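-- pv_equiv track=rewrite | github.com/Leepak777/Insurance_db | ocr/debit_note_parser.py | split_by_copy
-- ===== SOURCE A (Python) =====
-- from typing import Dict, List
--
-- def split_by_copy(text: str) -> List[str]:
--     blocks = []
--     current = []
--
--     for line in text.splitlines():
--         if "COPY" in line.upper():
--             if current:
--                 blocks.append("\n".join(current))
--                 current = []
--         current.append(line)
--
--     if current:
--         blocks.append("\n".join(current))
--
--     return blocks
-- ===== SOURCE B (Python) =====
-- def split_by_copy(text: str):
--     # Staged passes: collect boundary indices first, then slice the line list
--     # into consecutive segments and join each.
--     lines = text.splitlines()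
--     if not lines:
--         return []
--     bounds = [i for i, line in enumerate(lines) if i > 0 and "COPY" in line.upper()]
--     cuts = [0] + bounds + [len(lines)]
--     return ["\n".join(lines[a:b]) for a, b in zip(cuts, cuts[1:])]
-- ===== Notes on version B (the rewrite author's own statement) =====
-- stated objective: alternative
-- what changed: Replaces A's single-pass flush-as-you-go accumulator with staged passes: first compute the list of boundary indices (positions i>0 whose line contains COPY case-insensitively), then slice the line list between consecutive cut points and join each segment.
import Mathlib
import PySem

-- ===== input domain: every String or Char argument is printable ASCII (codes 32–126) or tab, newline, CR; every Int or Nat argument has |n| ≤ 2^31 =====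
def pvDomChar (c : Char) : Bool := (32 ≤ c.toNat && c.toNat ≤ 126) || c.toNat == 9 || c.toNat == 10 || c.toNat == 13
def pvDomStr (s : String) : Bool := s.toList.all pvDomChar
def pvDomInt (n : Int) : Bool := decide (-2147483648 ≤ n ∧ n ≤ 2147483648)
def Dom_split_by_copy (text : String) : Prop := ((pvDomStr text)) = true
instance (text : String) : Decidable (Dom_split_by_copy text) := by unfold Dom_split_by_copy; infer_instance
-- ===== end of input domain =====

-- B replaces A's single-pass flush-as-you-go accumulator with staged passes
-- (boundary indices, then slicing); alternative decomposition, same cost.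

-- ===== PORT A =====
-- forward scan: (blocks so far, current buffer); flush buffer when a COPY line arrives
def pvStepA (st : List String × List String) (line : String) : List String × List String :=
  let st :=
    if PySem.Str.isIn "COPY" (PySem.Str.upper line) then
      (if st.2 ≠ [] then (st.1 ++ [PySem.Str.join "\n" st.2], ([] : List String)) else st)
    else st
  (st.1, st.2 ++ [line])

def split_by_copy (text : String) : List String :=
  let st := (PySem.Str.splitlines text).foldl pvStepA ([], [])
  if st.2 ≠ [] then st.1 ++ [PySem.Str.join "\n" st.2] else st.1

-- ===== PORT B =====
-- staged passes: boundary indices via enumerate/filter, then slice between cuts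
def split_by_copy_alt (text : String) : List String :=
  let lines := PySem.Str.splitlines text
  if lines = [] then []
  else
    let bounds := ((PySem.List.enumerate lines 0).filter
        (fun p => decide (0 < p.1) && PySem.Str.isIn "COPY" (PySem.Str.upper p.2))).map (·.1)
    let cuts := (0 : Int) :: bounds ++ [(lines.length : Int)]
    (cuts.zip cuts.tail).map
      (fun p => PySem.Str.join "\n" (PySem.List.slice lines (some p.1) (some p.2)))

-- ===== PRECONDITION & SPEC =====
def Spec_split_by_copy (text : String) (out : List String) : Prop := out = split_by_copy_alt text
instance (text : String) (out : List String) : Decidable (Spec_split_by_copy text out) := by unfold Spec_split_by_copy; infer_instance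

-- ===== CLAIM (what is proved, stated in full; the proofs are below) =====
def Claim_equal_split_by_copy : Prop := ∀ (text : String), Dom_split_by_copy text → Spec_split_by_copy text (split_by_copy text)

-- ===== LEMMAS AND PROOFS =====

-- common reference: the block list produced from a nonempty current buffer `cur`
def pvGroups (cur : List String) : List String → List String
  | [] => [PySem.Str.join "\n" cur]
  | l :: ls =>
    if PySem.Str.isIn "COPY" (PySem.Str.upper l) then
      PySem.Str.join "\n" cur :: pvGroups [l] ls
    else
      pvGroups (cur ++ [l]) ls

-- boundary indices of ls, counted from start k
def pvBnds : List String → Nat → List Int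
  | [], _ => []
  | l :: ls, k =>
    (if PySem.Str.isIn "COPY" (PySem.Str.upper l) then [(k : Int)] else []) ++ pvBnds ls (k + 1)

lemma pvStepA_pos {st : List String × List String} {l : String}
    (hc : PySem.Str.isIn "COPY" (PySem.Str.upper l) = true) (h2 : st.2 ≠ []) :
    pvStepA st l = (st.1 ++ [PySem.Str.join "\n" st.2], [l]) := by
  unfold pvStepA
  rw [if_pos hc, if_pos h2]
  rfl

lemma pvStepA_neg {st : List String × List String} {l : String}
    (hc : ¬ PySem.Str.isIn "COPY" (PySem.Str.upper l) = true) :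
    pvStepA st l = (st.1, st.2 ++ [l]) := by
  unfold pvStepA
  rw [if_neg hc]

lemma pvStepA_empty (b : List String) (l : String) :
    pvStepA (b, []) l = (b, [l]) := by
  unfold pvStepA
  by_cases hc : PySem.Str.isIn "COPY" (PySem.Str.upper l) = true
  · rw [if_pos hc, if_neg (by simp)]
    rfl
  · rw [if_neg hc]
    rfl

lemma pvGroups_pos {l : String} (cur ls : List String)
    (hc : PySem.Str.isIn "COPY" (PySem.Str.upper l) = true) :
    pvGroups cur (l :: ls) = PySem.Str.join "\n" cur :: pvGroups [l] ls := by
  unfold pvGroups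
  rw [if_pos hc]
  cases ls <;> rfl

lemma pvGroups_neg {l : String} (cur ls : List String)
    (hc : ¬ PySem.Str.isIn "COPY" (PySem.Str.upper l) = true) :
    pvGroups cur (l :: ls) = pvGroups (cur ++ [l]) ls := by
  unfold pvGroups
  rw [if_neg hc]
  cases ls <;> rfl

lemma pvA_loop (ls : List String) : ∀ (b cur : List String), cur ≠ [] →
    (let st := ls.foldl pvStepA (b, cur);
     if st.2 ≠ [] then st.1 ++ [PySem.Str.join "\n" st.2] else st.1)
      = b ++ pvGroups cur ls := by
  induction ls with
  | nil =>
    intro b cur h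
    simp only [List.foldl_nil, pvGroups]
    rw [if_pos h]
  | cons l ls ih =>
    intro b cur h
    rw [List.foldl_cons]
    by_cases hc : PySem.Str.isIn "COPY" (PySem.Str.upper l) = true
    · rw [pvStepA_pos hc h, pvGroups_pos cur ls hc,
        ih (b ++ [PySem.Str.join "\n" cur]) [l] (by simp), List.append_assoc]
      rfl
    · rw [pvStepA_neg hc, pvGroups_neg cur ls hc]
      exact ih b (cur ++ [l]) (by simp)

-- the enumerate/filter/map pass computes pvBnds (for a positive start)
lemma pvEnumBnds (ls : List String) : ∀ (k : Nat), 0 < k →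
    ((PySem.List.enumerate ls (k : Int)).filter
        (fun p => decide (0 < p.1) && PySem.Str.isIn "COPY" (PySem.Str.upper p.2))).map (·.1)
      = pvBnds ls k := by
  induction ls with
  | nil => intro k _; simp [PySem.List.enumerate, pvBnds]
  | cons l ls ih =>
    intro k hk
    rw [PySem.List.enumerate_cons, List.filter_cons,
      show ((k : Int) + 1) = ((k + 1 : Nat) : Int) from by push_cast; ring]
    by_cases hc : PySem.Str.isIn "COPY" (PySem.Str.upper l) = true
    · rw [if_pos (by
        show (decide ((0 : Int) < (k : Int)) && PySem.Str.isIn "COPY" (PySem.Str.upper l)) = true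
        rw [hc, decide_eq_true (by exact_mod_cast hk)]
        rfl)]
      rw [List.map_cons, ih (k + 1) (by omega)]
      simp only [pvBnds]
      rw [if_pos hc, List.singleton_append]
    · rw [if_neg (by
        show ¬ (decide ((0 : Int) < (k : Int)) && PySem.Str.isIn "COPY" (PySem.Str.upper l)) = true
        simp only [Bool.and_eq_true]
        exact fun h => hc h.2)]
      rw [ih (k + 1) (by omega)]
      simp only [pvBnds]
      rw [if_neg hc, List.nil_append]

-- the middle slice of pre ++ cur ++ rest is cur
lemma pvSliceMid (pre cur rest : List String) :
    PySem.List.slice (pre ++ cur ++ rest) (some (pre.length : Int))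
        (some ((pre.length + cur.length : Nat) : Int)) = cur := by
  rw [PySem.List.slice_natCast, List.append_assoc, Nat.add_sub_cancel_left,
    List.drop_left, List.take_left]

-- the slicing pass over the cut points reproduces pvGroups
lemma pvSeg (ls : List String) : ∀ (pre cur : List String), cur ≠ [] →
    (let cuts := ((pre.length : Nat) : Int) ::
        pvBnds ls (pre.length + cur.length)
        ++ [((pre.length + cur.length + ls.length : Nat) : Int)];
     (cuts.zip cuts.tail).map
       (fun p => PySem.Str.join "\n"
         (PySem.List.slice (pre ++ cur ++ ls) (some p.1) (some p.2))))
      = pvGroups cur ls := by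
  induction ls with
  | nil =>
    intro pre cur _
    have hs := pvSliceMid pre cur []
    simp only [List.append_nil, Nat.cast_add] at hs
    simp [pvBnds, pvGroups, hs]
  | cons l ls ih =>
    intro pre cur h
    by_cases hc : PySem.Str.isIn "COPY" (PySem.Str.upper l) = true
    · -- boundary at |pre|+|cur|: first segment is cur, the rest via IH on (pre ++ cur), [l]
      rw [pvGroups_pos cur ls hc]
      simp only [pvBnds]
      rw [if_pos hc]
      simp only [List.cons_append, List.tail_cons, List.zip_cons_cons, List.map_cons]
      have hIH := ih (pre ++ cur) [l] (by simp)
      simp only [List.length_append, List.length_singleton] at hIH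
      rw [show pre.length + cur.length + 1 + ls.length
            = pre.length + cur.length + (l :: ls).length from by simp; omega] at hIH
      rw [show pre ++ cur ++ [l] ++ ls = pre ++ cur ++ (l :: ls) from by simp] at hIH
      exact congrArg₂ _ (by rw [pvSliceMid pre cur (l :: ls)]) hIH
    · -- no boundary: fold l into cur and recurse
      rw [pvGroups_neg cur ls hc]
      simp only [pvBnds]
      rw [if_neg hc]
      simp only [List.nil_append]
      have hIH := ih pre (cur ++ [l]) (by simp)
      simp only [List.length_append, List.length_singleton] at hIH
      rw [show pre.length + (cur.length + 1) + ls.length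
            = pre.length + cur.length + (l :: ls).length from by simp; omega] at hIH
      rw [show pre.length + (cur.length + 1) = pre.length + cur.length + 1 from by omega] at hIH
      rw [show pre ++ (cur ++ [l]) ++ ls = pre ++ cur ++ (l :: ls) from by simp] at hIH
      exact hIH

lemma pv_main (text : String) : split_by_copy text = split_by_copy_alt text := by
  cases hls : PySem.Str.splitlines text with
  | nil => simp [split_by_copy, split_by_copy_alt, hls]
  | cons l ls =>
    have hA : split_by_copy text = pvGroups [l] ls := by
      unfold split_by_copy
      rw [hls, List.foldl_cons, pvStepA_empty, pvA_loop ls [] [l] (by simp), List.nil_append]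
    have hseg := pvSeg ls [] [l] (by simp)
    simp only [List.length_nil, List.length_singleton, List.nil_append, Nat.zero_add,
      Nat.cast_zero, List.singleton_append] at hseg
    have hB : split_by_copy_alt text = pvGroups [l] ls := by
      simp only [split_by_copy_alt, hls]
      rw [if_neg (by simp), PySem.List.enumerate_cons, List.filter_cons,
        if_neg (by simp),
        show ((0 : Int) + 1) = ((1 : Nat) : Int) from by norm_num,
        pvEnumBnds ls 1 (by omega),
        show (((l :: ls).length : Nat) : Int) = ((1 + ls.length : Nat) : Int) from by
          simp; omega]
      exact hseg
    rw [hA, hB]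

-- ===== VERDICT (by name: the statement is the Claim_ definition above) =====
theorem split_by_copy_spec : Claim_equal_split_by_copy := by
  intro text _
  unfold Spec_split_by_copy
  exact pv_main text
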